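-- pv_equiv track=rewrite | github.com/SavaniSawaikar/notes | logic/coursework/parser2.1.py | clean_negations
-- ===== SOURCE A (Python) =====
-- def clean_negations(expression):
--    # if there are an odd number of negations leave only 1. if there are even remove them all
--    count = 0
--    for char in expression:
--        if char == '~':
--            count += 1
--        else:
--            break
--    if count % 2 == 0:
--        return expression[count:]
--    else:
--        return '~' + expression[count:]
-- ===== SOURCE B (Python) =====
-- def clean_negations(expression):
--     while expression.startswith('~~'):
--         expression = expression[2:]
--     return expression
-- ===== Notes on version B (the rewrite author's own statement) =====
-- stated objective: simpler
-- what changed: B repeatedly strips leading tilde pairs in a reduction loop instead of counting leading tildes and taking a parity-based slice.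
import Mathlib
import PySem

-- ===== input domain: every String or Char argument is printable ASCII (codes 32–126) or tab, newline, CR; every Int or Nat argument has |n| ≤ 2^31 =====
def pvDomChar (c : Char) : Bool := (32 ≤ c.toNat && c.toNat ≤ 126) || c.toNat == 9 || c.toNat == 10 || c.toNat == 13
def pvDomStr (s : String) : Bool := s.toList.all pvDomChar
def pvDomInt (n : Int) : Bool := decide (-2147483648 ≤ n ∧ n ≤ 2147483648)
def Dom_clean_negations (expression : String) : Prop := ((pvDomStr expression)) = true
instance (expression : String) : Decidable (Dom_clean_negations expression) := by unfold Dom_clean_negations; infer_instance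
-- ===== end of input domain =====

-- B replaces A's count-then-parity-slice by a loop repeatedly dropping a leading tilde pair (simpler: no counter, no parity branch).

-- ===== PORT A =====
-- the 'for char in expression: if '~' count += 1 else break' loop, with the running count
def cleanNegA_loop (acc : Nat) : List Char → Nat
  | [] => acc
  | c :: cs => if c = '~' then cleanNegA_loop (acc + 1) cs else acc

def clean_negations (expression : String) : String :=
  let count := cleanNegA_loop 0 expression.toList
  if count % 2 = 0 then
    String.ofList (PySem.List.slice expression.toList (some (count : Int)) none)
  else
    String.ofList ('~' :: PySem.List.slice expression.toList (some (count : Int)) none)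

-- ===== PORT B =====
-- 'while expression.startswith("~~"): expression = expression[2:]'
def cleanNegB_strip : List Char → List Char
  | c1 :: c2 :: cs => if c1 = '~' ∧ c2 = '~' then cleanNegB_strip cs else c1 :: c2 :: cs
  | cs => cs

def clean_negations_alt (expression : String) : String :=
  String.ofList (cleanNegB_strip expression.toList)

-- ===== PRECONDITION & SPEC =====
def Spec_clean_negations (expression : String) (out : String) : Prop := out = clean_negations_alt expression
instance (expression : String) (out : String) : Decidable (Spec_clean_negations expression out) := by unfold Spec_clean_negations; infer_instance

-- ===== CLAIM (what is proved, stated in full; the proofs are below) =====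
def Claim_equal_clean_negations : Prop := ∀ (expression : String), Dom_clean_negations expression → Spec_clean_negations expression (clean_negations expression)

-- ===== LEMMAS AND PROOFS =====
theorem cleanNegA_loop_acc (cs : List Char) : ∀ acc, cleanNegA_loop acc cs = acc + cleanNegA_loop 0 cs := by
  induction cs with
  | nil => intro acc; simp [cleanNegA_loop]
  | cons c cs ih =>
    intro acc
    by_cases h : c = '~' <;> simp [cleanNegA_loop, h, ih (acc + 1), ih 1] <;> omega

theorem cleanNeg_main (cs : List Char) :
    (if cleanNegA_loop 0 cs % 2 = 0 then cs.drop (cleanNegA_loop 0 cs)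
     else '~' :: cs.drop (cleanNegA_loop 0 cs)) = cleanNegB_strip cs := by
  match cs with
  | [] => simp [cleanNegA_loop, cleanNegB_strip]
  | [c] =>
    by_cases h : c = '~' <;>
      simp [cleanNegA_loop, cleanNegB_strip, h]
  | c1 :: c2 :: rest =>
    by_cases h1 : c1 = '~'
    · by_cases h2 : c2 = '~'
      · have ih := cleanNeg_main rest
        simp only [cleanNegB_strip, h1, h2, and_self, if_true]
        simp only [cleanNegA_loop, if_true, cleanNegA_loop_acc rest 2]
        have hmod : (2 + cleanNegA_loop 0 rest) % 2 = cleanNegA_loop 0 rest % 2 := by omega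
        rw [hmod]
        have hd : List.drop (2 + cleanNegA_loop 0 rest) ('~' :: '~' :: rest)
            = List.drop (cleanNegA_loop 0 rest) rest := by
          rw [Nat.add_comm]
          rfl
        rw [hd]
        exact ih
      · simp [cleanNegA_loop, cleanNegB_strip, h1, h2]
    · simp [cleanNegA_loop, cleanNegB_strip, h1]

-- ===== VERDICT (by name: the statement is the Claim_ definition above) =====
theorem clean_negations_spec : Claim_equal_clean_negations := by
  intro e _
  unfold Spec_clean_negations clean_negations clean_negations_alt
  simp only [PySem.List.slice_from_natCast]
  rw [← cleanNeg_main e.toList]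
  split <;> rfl
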